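-- pv_equiv track=rewrite | github.com/ChinmayyK/BlockVault | blockvault-redactor/app/redaction_mask.py | _mask_bits_to_ranges
-- ===== SOURCE A (Python) =====
-- from typing import Dict, List, Tuple
--
-- def _mask_bits_to_ranges(mask_bits: List[int], chunk_size: int, max_len: int) -> List[Dict[str, int]]:
--     """Convert a list of 0/1 mask bits into merged byte ranges."""
--     ranges: List[Dict[str, int]] = []
--     current_start = None
--     for idx, bit in enumerate(mask_bits):
--         if bit and current_start is None:
--             current_start = idx * chunk_size
--         if not bit and current_start is not None:
--             end = min(idx * chunk_size, max_len)
--             if current_start < end: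
--                 ranges.append({"start": current_start, "end": end})
--             current_start = None
--     if current_start is not None:
--         end = min(len(mask_bits) * chunk_size, max_len)
--         if current_start < end:
--             ranges.append({"start": current_start, "end": end})
--     return ranges
-- ===== SOURCE B (Python) =====
-- def _mask_bits_to_ranges(mask_bits, chunk_size, max_len):
--     """Edge-detection formulation: find rising/falling transition indices, pair them up."""
--     bits = [bool(b) for b in mask_bits]
--     prevs = [False] + bits
--     nexts = bits[1:] + [False]
--     starts = [i for i, (b, p) in enumerate(zip(bits, prevs)) if b and not p]
--     ends = [i + 1 for i, (b, nx) in enumerate(zip(bits, nexts)) if b and not nx]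
--     ranges = []
--     for s_i, e_i in zip(starts, ends):
--         start = s_i * chunk_size
--         end = min(e_i * chunk_size, max_len)
--         if start < end:
--             ranges.append({"start": start, "end": end})
--     return ranges
-- ===== Notes on version B (the rewrite author's own statement) =====
-- stated objective: alternative
-- what changed: Replaces A's single-pass state machine (optional current_start carried across iterations plus an explicit tail-flush block) with edge detection in staged passes: one pass computes the rising-edge index list, another the falling-edge index list (via zips with the shifted bit list), and the two lists are zipped and converted to ranges with no carried state and no tail handling.
import Mathlib
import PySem

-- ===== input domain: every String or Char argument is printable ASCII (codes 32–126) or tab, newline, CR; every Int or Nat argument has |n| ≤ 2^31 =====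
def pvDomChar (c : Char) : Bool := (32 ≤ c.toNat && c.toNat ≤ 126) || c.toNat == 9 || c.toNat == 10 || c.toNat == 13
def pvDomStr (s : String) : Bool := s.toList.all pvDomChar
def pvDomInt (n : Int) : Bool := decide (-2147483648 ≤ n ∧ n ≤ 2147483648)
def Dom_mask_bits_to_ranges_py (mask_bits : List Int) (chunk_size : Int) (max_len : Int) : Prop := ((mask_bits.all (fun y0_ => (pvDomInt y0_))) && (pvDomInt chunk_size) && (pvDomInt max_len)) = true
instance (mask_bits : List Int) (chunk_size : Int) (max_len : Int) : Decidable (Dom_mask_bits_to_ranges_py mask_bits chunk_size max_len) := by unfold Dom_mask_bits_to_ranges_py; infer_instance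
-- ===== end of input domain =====

-- B replaces A's per-index state machine (optional current_start + tail flush) by edge detection:
-- separate passes compute the rising-edge and falling-edge index lists, which are zipped into
-- ranges; same cost ("alternative").

-- ===== PORT A =====
-- the for-loop of A, carrying (ranges, current_start) and the running index idx
def pvALoop (chunk_size max_len : Int) :
    List Int → Int → List (List (String × Int)) → Option Int →
    List (List (String × Int)) × Option Int
  | [], _, ranges, cur => (ranges, cur)
  | bit :: rest, idx, ranges, cur =>
    -- if bit and current_start is None: current_start = idx * chunk_size
    let cur := if bit ≠ 0 ∧ cur = none then some (idx * chunk_size) else cur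
    -- if not bit and current_start is not None: …
    match cur with
    | some s =>
      if bit = 0 then
        let e := min (idx * chunk_size) max_len
        pvALoop chunk_size max_len rest (idx + 1)
          (if s < e then ranges ++ [[("start", s), ("end", e)]] else ranges) none
      else
        pvALoop chunk_size max_len rest (idx + 1) ranges (some s)
    | none => pvALoop chunk_size max_len rest (idx + 1) ranges none

def mask_bits_to_ranges_py (mask_bits : List Int) (chunk_size : Int) (max_len : Int) :
    List (List (String × Int)) :=
  let st := pvALoop chunk_size max_len mask_bits 0 [] none
  match st.2 with
  | some s =>
    let e := min ((mask_bits.length : Int) * chunk_size) max_len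
    if s < e then st.1 ++ [[("start", s), ("end", e)]] else st.1
  | none => st.1

-- ===== PORT B =====
-- bits = [bool(b) for b in mask_bits]; prevs = [False] + bits; nexts = bits[1:] + [False]
-- starts = [i for i, (b, p) in enumerate(zip(bits, prevs)) if b and not p]
-- ends   = [i + 1 for i, (b, nx) in enumerate(zip(bits, nexts)) if b and not nx]
def mask_bits_to_ranges_py_alt (mask_bits : List Int) (chunk_size : Int) (max_len : Int) :
    List (List (String × Int)) :=
  let bits := mask_bits.map (fun b => decide (b ≠ 0))
  let prevs := false :: bits
  let nexts := bits.tail ++ [false]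
  let starts := (PySem.List.enumerate (List.zip bits prevs)).filterMap
      (fun p => if p.2.1 = true ∧ p.2.2 = false then some p.1 else none)
  let ends := (PySem.List.enumerate (List.zip bits nexts)).filterMap
      (fun p => if p.2.1 = true ∧ p.2.2 = false then some (p.1 + 1) else none)
  (List.zip starts ends).foldl (fun ranges se =>
      let start := se.1 * chunk_size
      let e := min (se.2 * chunk_size) max_len
      if start < e then ranges ++ [[("start", start), ("end", e)]] else ranges) []

-- ===== PRECONDITION & SPEC =====
def Spec_mask_bits_to_ranges_py (mask_bits : List Int) (chunk_size : Int) (max_len : Int) (out : List (List (String × Int))) : Prop := out = mask_bits_to_ranges_py_alt mask_bits chunk_size max_len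
instance (mask_bits : List Int) (chunk_size : Int) (max_len : Int) (out : List (List (String × Int))) : Decidable (Spec_mask_bits_to_ranges_py mask_bits chunk_size max_len out) := by unfold Spec_mask_bits_to_ranges_py; infer_instance

-- ===== CLAIM (what is proved, stated in full; the proofs are below) =====
def Claim_equal_mask_bits_to_ranges_py : Prop := ∀ (mask_bits : List Int) (chunk_size : Int) (max_len : Int), Dom_mask_bits_to_ranges_py mask_bits chunk_size max_len → Spec_mask_bits_to_ranges_py mask_bits chunk_size max_len (mask_bits_to_ranges_py mask_bits chunk_size max_len)

-- ===== LEMMAS AND PROOFS =====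

-- maximal runs of equal truthiness, as (key, length)
def pvRuns : List Int → List (Bool × Int)
  | [] => []
  | b :: rest =>
    let k := decide (b ≠ 0)
    let run := rest.takeWhile (fun y => decide (y ≠ 0) == k)
    (k, 1 + (run.length : Int)) :: pvRuns (rest.dropWhile (fun y => decide (y ≠ 0) == k))
  termination_by xs => xs.length
  decreasing_by simpa using Nat.lt_succ_of_le (List.length_dropWhile_le _ _)

-- the (startIdx, endIdx) pairs of the truthy runs, given the absolute offset
def pvPairs : List (Bool × Int) → Int → List (Int × Int)
  | [], _ => []
  | (k, L) :: rs, o => (if k then [(o, o + L)] else []) ++ pvPairs rs (o + L)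

def pvEmit (chunk_size max_len : Int) (ranges : List (List (String × Int))) (se : Int × Int) :
    List (List (String × Int)) :=
  let start := se.1 * chunk_size
  let e := min (se.2 * chunk_size) max_len
  if start < e then ranges ++ [[("start", start), ("end", e)]] else ranges

-- rising edges: index i where bit true and previous bit (carried) false
def pvS : List Bool → Bool → Int → List Int
  | [], _, _ => []
  | b :: r, p, o => (if b = true ∧ p = false then [o] else []) ++ pvS r b (o + 1)

-- falling edges: index i+1 where bit true and next bit (lookahead, default false) false
def pvE : List Bool → Int → List Int
  | [], _ => []
  | b :: r, o => (if b = true ∧ r.headD false = false then [o + 1] else []) ++ pvE r (o + 1)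

-- finalize A's loop state at final index n (the tail-flush block of A)
def pvFin (chunk_size max_len n : Int) (st : List (List (String × Int)) × Option Int) :
    List (List (String × Int)) :=
  match st.2 with
  | some s =>
    let e := min (n * chunk_size) max_len
    if s < e then st.1 ++ [[("start", s), ("end", e)]] else st.1
  | none => st.1

-- a zero-run is a no-op for A when current_start is none
theorem pvALoop_zeros (c m : Int) (zs rest : List Int) (hz : ∀ b ∈ zs, b = 0) :
    ∀ idx ranges, pvALoop c m (zs ++ rest) idx ranges none
      = pvALoop c m rest (idx + zs.length) ranges none := by
  induction zs with
  | nil => intro idx ranges; simp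
  | cons b t ih =>
    intro idx ranges
    have hb : b = 0 := hz b (by simp)
    simp only [List.cons_append, pvALoop, hb]
    simp only [ne_eq, not_true_eq_false, false_and, if_false]
    rw [ih (fun x hx => hz x (by simp [hx]))]
    congr 1
    simp only [List.length_cons]
    push_cast; ring

-- a truthy run keeps current_start unchanged
theorem pvALoop_ones (c m : Int) (os rest : List Int) (ho : ∀ b ∈ os, b ≠ 0) :
    ∀ idx s ranges, pvALoop c m (os ++ rest) idx ranges (some s)
      = pvALoop c m rest (idx + os.length) ranges (some s) := by
  induction os with
  | nil => intro idx s ranges; simp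
  | cons b t ih =>
    intro idx s ranges
    have hb : b ≠ 0 := ho b (by simp)
    simp only [List.cons_append, pvALoop]
    simp only [reduceCtorEq, and_false, if_false, hb]
    rw [ih (fun x hx => ho x (by simp [hx]))]
    congr 1
    simp only [List.length_cons]
    push_cast; ring

theorem pvPairs_false (rs : List (Bool × Int)) (L o : Int) :
    pvPairs ((false, L) :: rs) o = pvPairs rs (o + L) := by
  simp [pvPairs]

theorem pvPairs_true (rs : List (Bool × Int)) (L o : Int) :
    pvPairs ((true, L) :: rs) o = (o, o + L) :: pvPairs rs (o + L) := by
  simp [pvPairs]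

-- A's loop + flush from a closed state = the emit-fold over the truthy-run pairs
theorem pvMainA (c m : Int) : ∀ xs idx ranges,
    pvFin c m (idx + xs.length) (pvALoop c m xs idx ranges none)
      = (pvPairs (pvRuns xs) idx).foldl (pvEmit c m) ranges := by
  intro xs
  induction hn : xs.length using Nat.strong_induction_on generalizing xs with
  | _ n ih =>
  subst hn
  intro idx ranges
  match xs with
  | [] => simp [pvRuns, pvPairs, pvFin, pvALoop]
  | b :: rest =>
    by_cases hb : b = 0
    · -- falsy run: A skips it with cur = none; B advances the offset only
      subst hb
      set p : Int → Bool := fun y => decide (y ≠ 0) == false with hp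
      have hzs : ∀ x ∈ (0:Int) :: rest.takeWhile p, x = 0 := by
        intro x hx
        rcases List.mem_cons.1 hx with h | h
        · exact h
        · have := List.mem_takeWhile_imp h
          simpa [hp] using this
      have hsplit : (0:Int) :: rest = ((0:Int) :: rest.takeWhile p) ++ rest.dropWhile p := by
        simp [List.takeWhile_append_dropWhile]
      have hrs : pvRuns ((0:Int) :: rest)
          = (false, 1 + ((rest.takeWhile p).length : Int)) :: pvRuns (rest.dropWhile p) := by
        rw [pvRuns]; simp [hp]
      have hlen : (rest.dropWhile p).length < ((0:Int) :: rest).length := by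
        simpa using Nat.lt_succ_of_le (List.length_dropWhile_le _ _)
      have hidx : idx + ((((0:Int) :: rest.takeWhile p) ++ rest.dropWhile p).length : Int)
          = (idx + (((0:Int) :: rest.takeWhile p).length : Int))
            + ((rest.dropWhile p).length : Int) := by
        simp only [List.length_append]
        push_cast; ring
      rw [hrs, pvPairs_false]
      conv_lhs => rw [hsplit]
      rw [pvALoop_zeros c m _ _ hzs, hidx, ih _ hlen _ rfl]
      have hoff : idx + ((((0:Int) :: rest.takeWhile p)).length : Int)
          = idx + (1 + ((rest.takeWhile p).length : Int)) := by
        simp only [List.length_cons]; push_cast; ring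
      rw [hoff]
    · -- truthy run: A opens at idx*c; it closes at the first following zero (or at the flush)
      have hk : decide (b ≠ 0) = true := by simpa using hb
      set p : Int → Bool := fun y => decide (y ≠ 0) == true with hp
      have hos : ∀ x ∈ rest.takeWhile p, x ≠ 0 := by
        intro x hx
        have := List.mem_takeWhile_imp hx
        simpa [hp] using this
      have hsplit : rest = rest.takeWhile p ++ rest.dropWhile p :=
        (List.takeWhile_append_dropWhile ..).symm
      have hstep : ∀ r, pvALoop c m (b :: r) idx ranges none
          = pvALoop c m r (idx + 1) ranges (some (idx * c)) := by
        intro r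
        rw [pvALoop]
        simp [hb]
      have hrs : pvRuns (b :: rest)
          = (true, 1 + ((rest.takeWhile p).length : Int)) :: pvRuns (rest.dropWhile p) := by
        rw [pvRuns]; simp [hp, hk]
      rw [hrs, pvPairs_true, List.foldl_cons]
      conv_lhs => rw [hsplit]
      rw [hstep, pvALoop_ones c m _ _ hos]
      set t := rest.takeWhile p with ht
      set d := rest.dropWhile p with hd
      set j : Int := idx + 1 + t.length with hj
      have hoff : idx + (1 + (t.length : Int)) = j := by rw [hj]; ring
      have hemit : pvEmit c m ranges (idx, idx + (1 + (t.length : Int)))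
          = (if idx * c < min (j * c) m then
              ranges ++ [[("start", idx * c), ("end", min (j * c) m)]] else ranges) := by
        simp [pvEmit, hoff]
      match hdm : d with
      | [] =>
        have hxlen : idx + (((b :: (t ++ ([] : List Int)))).length : Int) = j := by
          simp only [List.append_nil, List.length_cons, hj]
          push_cast; ring
        rw [hxlen, hemit, hoff]
        simp [pvALoop, pvRuns, pvPairs, pvFin]
      | z :: rr =>
        have hz : z = 0 := by
          have h0 := List.head?_dropWhile_not p rest
          rw [← hd] at h0
          simpa [hp] using h0
        have hclose : pvALoop c m (z :: rr) j ranges (some (idx * c))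
            = pvALoop c m (z :: rr) j
                (if idx * c < min (j * c) m then
                  ranges ++ [[("start", idx * c), ("end", min (j * c) m)]] else ranges)
                none := by
          conv_lhs => rw [pvALoop]
          conv_rhs => rw [pvALoop]
          simp [hz]
        have hlen : (z :: rr).length < (b :: rest).length := by
          have h1 : (z :: rr).length ≤ rest.length := by
            rw [hd]; exact List.length_dropWhile_le _ _
          simpa using Nat.lt_succ_of_le h1
        have hxlen : idx + (((b :: (t ++ z :: rr))).length : Int)
            = j + (((z :: rr) : List Int).length : Int) := by
          simp only [List.length_cons, List.length_append, hj]
          push_cast; ring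
        rw [hclose, hxlen, ih _ hlen _ rfl, hemit, hoff]

-- ===== edges and runs =====

-- falsy bits contribute no rising edge and reset the carried prev to false
theorem pvS_zeros (ts : List Bool) (hz : ∀ b ∈ ts, b = false) :
    ∀ rest o, pvS (ts ++ rest) false o = pvS rest false (o + ts.length) := by
  induction ts with
  | nil => intro rest o; simp
  | cons b t ih =>
    intro rest o
    have hb : b = false := hz b (by simp)
    subst hb
    rw [List.cons_append, pvS, if_neg (by simp), List.nil_append,
      ih (fun x hx => hz x (by simp [hx]))]
    congr 1
    simp only [List.length_cons]; push_cast; ring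

-- truthy bits after a truthy prev contribute no rising edge
theorem pvS_ones (ts : List Bool) (ho : ∀ b ∈ ts, b = true) :
    ∀ rest o, pvS (ts ++ rest) true o = pvS rest true (o + ts.length) := by
  induction ts with
  | nil => intro rest o; simp
  | cons b t ih =>
    intro rest o
    have hb : b = true := ho b (by simp)
    subst hb
    rw [List.cons_append, pvS, if_neg (by simp), List.nil_append,
      ih (fun x hx => ho x (by simp [hx]))]
    congr 1
    simp only [List.length_cons]; push_cast; ring

-- when the list is empty or starts falsy, the carried prev is irrelevant
theorem pvS_prev_irrel (bs : List Bool) (h : bs.headD false = false) (p : Bool) (o : Int) :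
    pvS bs p o = pvS bs false o := by
  match bs with
  | [] => rfl
  | b :: r =>
    have hb : b = false := by simpa using h
    subst hb
    simp [pvS]

-- falsy bits contribute no falling edge
theorem pvE_zeros (ts : List Bool) (hz : ∀ b ∈ ts, b = false) :
    ∀ rest o, pvE (ts ++ rest) o = pvE rest (o + ts.length) := by
  induction ts with
  | nil => intro rest o; simp
  | cons b t ih =>
    intro rest o
    have hb : b = false := hz b (by simp)
    subst hb
    rw [List.cons_append, pvE, if_neg (by simp), List.nil_append,
      ih (fun x hx => hz x (by simp [hx]))]
    congr 1
    simp only [List.length_cons]; push_cast; ring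

-- a truthy run followed by nothing-or-falsy yields exactly one falling edge, at its right end
theorem pvE_ones (ts : List Bool) (ho : ∀ b ∈ ts, b = true) :
    ∀ rest o, rest.headD false = false →
      pvE ((true :: ts) ++ rest) o = (o + 1 + ts.length) :: pvE rest (o + 1 + ts.length) := by
  induction ts with
  | nil =>
    intro rest o hr
    match rest with
    | [] => simp [pvE]
    | x :: rr =>
      have hx : x = false := by simpa using hr
      subst hx
      simp [pvE]
  | cons b t ih =>
    intro rest o hr
    have hb : b = true := ho b (by simp)
    subst hb
    have h1 : pvE ((true :: t) ++ rest) (o + 1)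
        = (o + 1 + 1 + t.length) :: pvE rest (o + 1 + 1 + t.length) :=
      ih (fun x hx => ho x (by simp [hx])) rest (o + 1) hr
    rw [List.cons_append, pvE, if_neg (by simp), List.nil_append, h1]
    have e : o + 1 + 1 + (t.length : Int) = o + 1 + ((t.length + 1 : Nat) : Int) := by
      push_cast; ring
    simp only [List.length_cons, e]

-- S over the truthiness image = first components of the truthy-run pairs
theorem pvSE_runs (xs : List Int) :
    ∀ o, pvS (xs.map (fun b => decide (b ≠ 0))) false o
            = (pvPairs (pvRuns xs) o).map Prod.fst
       ∧ pvE (xs.map (fun b => decide (b ≠ 0))) o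
            = (pvPairs (pvRuns xs) o).map Prod.snd := by
  induction hn : xs.length using Nat.strong_induction_on generalizing xs with
  | _ n ih =>
  subst hn
  intro o
  match xs with
  | [] => simp [pvS, pvE, pvRuns, pvPairs]
  | b :: rest =>
    by_cases hb : b = 0
    · subst hb
      set p : Int → Bool := fun y => decide (y ≠ 0) == false with hp
      set t := rest.takeWhile p with ht
      set d := rest.dropWhile p with hd
      have hzt : ∀ x ∈ t.map (fun b => decide (b ≠ 0)), x = false := by
        intro x hx
        obtain ⟨y, hy, rfl⟩ := List.mem_map.1 hx
        have := List.mem_takeWhile_imp (ht ▸ hy)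
        simpa [hp] using this
      have hsplit : rest = t ++ d := by rw [ht, hd]; simp [List.takeWhile_append_dropWhile]
      have hrs : pvRuns ((0:Int) :: rest) = (false, 1 + (t.length : Int)) :: pvRuns d := by
        rw [pvRuns]; simp [hp, ht, hd]
      have hlen : d.length < ((0:Int) :: rest).length := by
        rw [hd]; simpa using Nat.lt_succ_of_le (List.length_dropWhile_le _ _)
      have hih := ih _ hlen d rfl (o + (1 + (t.length : Int)))
      have harith : o + 1 + (t.length : Int) = o + (1 + (t.length : Int)) := by ring
      constructor
      · rw [hrs, pvPairs_false]
        conv_lhs => rw [hsplit]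
        rw [List.map_cons, List.map_append,
          show (decide ((0:Int) ≠ 0)) = false from by decide,
          pvS, if_neg (by simp), List.nil_append, pvS_zeros _ hzt, List.length_map, harith, hih.1]
      · rw [hrs, pvPairs_false]
        conv_lhs => rw [hsplit]
        rw [List.map_cons, List.map_append,
          show (decide ((0:Int) ≠ 0)) = false from by decide,
          pvE, if_neg (by simp), List.nil_append, pvE_zeros _ hzt, List.length_map, harith, hih.2]
    · have hk : decide (b ≠ 0) = true := by simpa using hb
      set p : Int → Bool := fun y => decide (y ≠ 0) == true with hp
      set t := rest.takeWhile p with ht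
      set d := rest.dropWhile p with hd
      have hot : ∀ x ∈ t.map (fun b => decide (b ≠ 0)), x = true := by
        intro x hx
        obtain ⟨y, hy, rfl⟩ := List.mem_map.1 hx
        have := List.mem_takeWhile_imp (ht ▸ hy)
        simpa [hp] using this
      have hsplit : rest = t ++ d := by rw [ht, hd]; simp [List.takeWhile_append_dropWhile]
      have hrs : pvRuns (b :: rest) = (true, 1 + (t.length : Int)) :: pvRuns d := by
        rw [pvRuns]; simp [hp, hk, ht, hd]
      have hlen : d.length < (b :: rest).length := by
        rw [hd]; simpa using Nat.lt_succ_of_le (List.length_dropWhile_le _ _)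
      have hdhead : (d.map (fun b => decide (b ≠ 0))).headD false = false := by
        match hdm : d with
        | [] => rfl
        | z :: rr =>
          have hz : z = 0 := by
            have h0 := List.head?_dropWhile_not p rest
            rw [← hd] at h0
            simpa [hp] using h0
          subst hz
          simp
      have hih := ih _ hlen d rfl (o + (1 + (t.length : Int)))
      have harith : o + 1 + (t.length : Int) = o + (1 + (t.length : Int)) := by ring
      constructor
      · rw [hrs, pvPairs_true]
        conv_lhs => rw [hsplit]
        simp only [List.map_cons, List.map_append, pvS, hk]
        simp only [and_self, if_true]
        rw [pvS_ones _ hot, List.length_map,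
          pvS_prev_irrel _ hdhead, harith, hih.1]
        simp
      · rw [hrs, pvPairs_true]
        conv_lhs => rw [hsplit]
        have he := pvE_ones (t.map (fun b => decide (b ≠ 0))) hot
          (d.map (fun b => decide (b ≠ 0))) o hdhead
        rw [List.cons_append] at he
        simp only [List.map_cons, List.map_append, hk]
        rw [he, List.length_map, harith, hih.2]

-- zipping the two projections of a pair list reassembles it
theorem pvZipProj (ps : List (Int × Int)) :
    List.zip (ps.map Prod.fst) (ps.map Prod.snd) = ps := by
  induction ps with
  | nil => rfl
  | cons q qs ih => simp [ih]

-- B's starts comprehension computes pvS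
theorem pvStartsEq : ∀ (bs : List Bool) (p : Bool) (o : Int),
    ((PySem.List.enumerate (List.zip bs (p :: bs)) o).filterMap
      (fun q => if q.2.1 = true ∧ q.2.2 = false then some q.1 else none)) = pvS bs p o := by
  intro bs
  induction bs with
  | nil => intro p o; rfl
  | cons b r ih =>
    intro p o
    simp only [List.zip_cons_cons, PySem.List.enumerate_cons, List.filterMap_cons]
    rw [ih b (o + 1)]
    by_cases h : b = true ∧ p = false
    · simp [pvS, h]
    · simp [pvS, h]

-- B's ends comprehension computes pvE
theorem pvEndsEq : ∀ (bs : List Bool) (o : Int),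
    ((PySem.List.enumerate (List.zip bs (bs.tail ++ [false])) o).filterMap
      (fun q => if q.2.1 = true ∧ q.2.2 = false then some (q.1 + 1) else none)) = pvE bs o := by
  intro bs
  induction bs with
  | nil => intro o; rfl
  | cons b r ih =>
    intro o
    match r with
    | [] =>
      simp only [List.tail_cons, List.nil_append, List.zip_cons_cons, List.zip_nil_left,
        PySem.List.enumerate_cons, List.filterMap_cons]
      by_cases h : b = true
      · simp [pvE, h]
      · simp [pvE, h, PySem.List.enumerate]
    | x :: r' =>
      have h1 := ih (o + 1)
      simp only [List.tail_cons] at h1 ⊢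
      simp only [List.cons_append, List.zip_cons_cons, PySem.List.enumerate_cons,
        List.filterMap_cons]
      rw [h1]
      by_cases h : b = true ∧ x = false
      · simp [pvE, h.1, h.2]
      · have h2 : ¬ (b = true ∧ (x :: r').headD false = false) := by simpa using h
        conv_rhs => rw [pvE]
        rw [if_neg h2, List.nil_append]
        simp [h]

-- ===== VERDICT (by name: the statement is the Claim_ definition above) =====
theorem mask_bits_to_ranges_py_spec : Claim_equal_mask_bits_to_ranges_py := by
  intro mask_bits c m _
  unfold Spec_mask_bits_to_ranges_py
  have hA := pvMainA c m mask_bits 0 []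
  have hSE := pvSE_runs mask_bits 0
  simp only [mask_bits_to_ranges_py, mask_bits_to_ranges_py_alt]
  have hl : (fun (ranges : List (List (String × Int))) (se : Int × Int) =>
      if se.1 * c < min (se.2 * c) m then
        ranges ++ [[("start", se.1 * c), ("end", min (se.2 * c) m)]] else ranges) = pvEmit c m := by
    funext r se; simp [pvEmit]
  rw [pvStartsEq, pvEndsEq, hSE.1, hSE.2, pvZipProj, hl, ← hA]
  simp [pvFin]
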